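-- pv_equiv track=rewrite | github.com/SevFle/nexus-trade-engine | engine/reference/search.py | _tokenize_name
-- ===== SOURCE A (Python) =====
-- def _tokenize_name(name: str) -> list[str]:
--     """Split a name into lowercase alphanumeric word tokens."""
--     out: list[str] = []
--     current: list[str] = []
--     for ch in name:
--         if ch.isalnum():
--             current.append(ch)
--         elif current:
--             out.append("".join(current))
--             current = []
--     if current:
--         out.append("".join(current))
--     return out
-- ===== SOURCE B (Python) =====
-- def _tokenize_name(name: str) -> list[str]:
--     return "".join(ch if ch.isalnum() else " " for ch in name).split()
-- ===== Notes on version B (the rewrite author's own statement) =====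
-- stated objective: idiomatic
-- what changed: Replaces the hand-rolled buffer-and-flush state machine with two staged passes: normalize every non-alphanumeric character to a space, then let str.split() extract the words.
import Mathlib
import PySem

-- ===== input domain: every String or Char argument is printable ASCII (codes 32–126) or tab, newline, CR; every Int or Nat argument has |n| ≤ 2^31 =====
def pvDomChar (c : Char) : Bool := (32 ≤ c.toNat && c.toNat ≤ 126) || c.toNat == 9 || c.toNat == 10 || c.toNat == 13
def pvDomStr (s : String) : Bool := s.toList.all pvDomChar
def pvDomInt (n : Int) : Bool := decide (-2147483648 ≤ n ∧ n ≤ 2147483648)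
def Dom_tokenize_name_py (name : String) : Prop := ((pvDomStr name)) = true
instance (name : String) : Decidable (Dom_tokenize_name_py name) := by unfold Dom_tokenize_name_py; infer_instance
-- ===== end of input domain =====

-- B replaces A's buffer-and-flush state machine by two staged passes: map every
-- non-alphanumeric character to a space, then str.split(); objective: idiomatic.

-- ===== PORT A =====
-- loop body of A's 'for ch in name': state is (out, current)
def pvAStep (st : List String × List Char) (ch : Char) : List String × List Char :=
  if PySem.Chars.isalnum ch then (st.1, st.2 ++ [ch])
  else if st.2.isEmpty then st
  else (st.1 ++ [String.ofList st.2], [])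

-- the final 'if current: out.append("".join(current))'
def pvAFlush (st : List String × List Char) : List String :=
  if st.2.isEmpty then st.1 else st.1 ++ [String.ofList st.2]

def tokenize_name_py (name : String) : List String :=
  pvAFlush (name.toList.foldl pvAStep ([], []))

-- ===== PORT B =====
-- 'ch if ch.isalnum() else " "'
def pvBNorm (c : Char) : Char := if PySem.Chars.isalnum c then c else ' '

-- '"".join(... for ch in name).split()'
def tokenize_name_py_alt (name : String) : List String :=
  PySem.Str.split₀ (String.ofList (name.toList.map pvBNorm))

-- ===== PRECONDITION & SPEC =====
def Spec_tokenize_name_py (name : String) (out : List String) : Prop := out = tokenize_name_py_alt name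
instance (name : String) (out : List String) : Decidable (Spec_tokenize_name_py name out) := by unfold Spec_tokenize_name_py; infer_instance

-- ===== CLAIM (what is proved, stated in full; the proofs are below) =====
def Claim_equal_tokenize_name_py : Prop := ∀ (name : String), Dom_tokenize_name_py name → Spec_tokenize_name_py name (tokenize_name_py name)

-- ===== LEMMAS AND PROOFS =====

lemma pvAlnumNotSpace (c : Char) (h : PySem.Chars.isalnum c = true) :
    PySem.Chars.isspace c = false := by
  simp only [PySem.Chars.isalnum, PySem.Chars.isalpha, PySem.Chars.isdigit,
    PySem.Chars.isupper, PySem.Chars.islower, PySem.Chars.isspace,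
    Char.le_def, Bool.or_eq_true, Bool.and_eq_true, decide_eq_true_eq] at *
  simp only [Bool.or_eq_false_iff, Bool.and_eq_false_iff, decide_eq_false_iff_not]
  have eA : ('A' : Char).val.toNat = 65 := rfl
  have eZ : ('Z' : Char).val.toNat = 90 := rfl
  have ea : ('a' : Char).val.toNat = 97 := rfl
  have ez : ('z' : Char).val.toNat = 122 := rfl
  have e0 : ('0' : Char).val.toNat = 48 := rfl
  have e9 : ('9' : Char).val.toNat = 57 := rfl
  rcases h with (h | h) | h <;>
    · rcases h with ⟨h1, h2⟩
      have g1 := (UInt32.le_iff_toNat_le ..).1 h1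
      have g2 := (UInt32.le_iff_toNat_le ..).1 h2
      simp only [Char.toNat] at *
      omega

-- A's fold with an accumulated 'out' is 'out ++' the fold started from an empty out
lemma pvOutPrefix (cs : List Char) : ∀ out cur,
    cs.foldl pvAStep (out, cur) =
      (out ++ (cs.foldl pvAStep ([], cur)).1, (cs.foldl pvAStep ([], cur)).2) := by
  induction cs with
  | nil => intro out cur; simp
  | cons c cs ih =>
    intro out cur
    simp only [List.foldl_cons]
    by_cases ha : PySem.Chars.isalnum c
    · simp [pvAStep, ha, ih out (cur ++ [c])]
    · by_cases hc : cur.isEmpty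
      · simp [pvAStep, ha, hc, ih out cur]
      · simp only [pvAStep, ha, Bool.false_eq_true, if_false, hc, List.nil_append]
        rw [ih (out ++ [String.ofList cur]) [], ih [String.ofList cur] []]
        simp

-- main invariant: split₀.go over the normalized list computes A's flush
lemma pvMain (cs : List Char) : ∀ cur acc,
    (PySem.Chars.split₀.go (cs.map pvBNorm) cur acc).map String.ofList =
      acc.reverse.map String.ofList ++ pvAFlush (cs.foldl pvAStep ([], cur.reverse)) := by
  induction cs with
  | nil =>
    intro cur acc
    by_cases h : cur.isEmpty
    · have : cur = [] := by simpa [List.isEmpty_iff] using h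
      subst this
      simp [PySem.Chars.split₀.go, pvAFlush]
    · have hr : cur.reverse.isEmpty = false := by
        simp [List.isEmpty_iff] at *; simpa using h
      simp [PySem.Chars.split₀.go, pvAFlush, h, hr]
  | cons c cs ih =>
    intro cur acc
    by_cases ha : PySem.Chars.isalnum c
    · have hb : pvBNorm c = c := by simp [pvBNorm, ha]
      have hsc : PySem.Chars.isspace c = false := pvAlnumNotSpace c ha
      simp only [List.map_cons, PySem.Chars.split₀.go, hsc, Bool.false_eq_true, if_false,
        List.foldl_cons, pvAStep, ha, if_true, hb]
      rw [ih (c :: cur) acc]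
      simp
    · have hs : PySem.Chars.isspace (pvBNorm c) = true := by
        rw [show pvBNorm c = ' ' from by simp [pvBNorm, ha]]; decide
      simp only [List.map_cons, PySem.Chars.split₀.go, hs, if_true,
        List.foldl_cons, pvAStep, ha, Bool.false_eq_true, if_false]
      by_cases hc : cur.isEmpty
      · have : cur = [] := by simpa [List.isEmpty_iff] using hc
        subst this
        simp only [List.isEmpty_nil, if_true]
        exact ih [] acc
      · have hr : cur.reverse.isEmpty = false := by
          simp [List.isEmpty_iff] at *; simpa using hc
        simp only [hc, Bool.false_eq_true, if_false, hr, List.nil_append]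
        rw [ih [] (cur.reverse :: acc)]
        rw [pvOutPrefix cs [String.ofList cur.reverse] []]
        simp [pvAFlush]
        split <;> simp

-- ===== VERDICT (by name: the statement is the Claim_ definition above) =====
theorem tokenize_name_py_spec : Claim_equal_tokenize_name_py := by
  intro name _
  unfold Spec_tokenize_name_py tokenize_name_py tokenize_name_py_alt
  unfold PySem.Str.split₀ PySem.Chars.split₀
  rw [show (String.ofList (name.toList.map pvBNorm)).toList = name.toList.map pvBNorm from by
    simp]
  rw [pvMain name.toList [] []]
  simp
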